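-- pv_equiv track=rewrite | github.com/Murtaza813/hifz-tracker | excel_handler.py | get_murajaat_available_pages
-- ===== SOURCE A (Python) =====
-- def calculate_juzhali_range(last_jadeed_page, juzhali_length=10):
--     """Calculate Juzhali page range from last Jadeed page"""
--     if last_jadeed_page is None:
--         return None, None
--
--     juzhali_end = last_jadeed_page
--     juzhali_start = max(1, juzhali_end - juzhali_length + 1)
--
--     return juzhali_start, juzhali_end
--
-- def get_murajaat_available_pages(last_jadeed_page, juzhali_length=10):
--     """Get pages available for Murajaat review"""
--     if last_jadeed_page is None:
--         return {}
--
--     juzhali_start, _ = calculate_juzhali_range(last_jadeed_page, juzhali_length)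
--
--     murajaat_pages = {}
--
--     # Add all completed siparas (pages before Juzhali)
--     for page in range(1, juzhali_start):
--         sipara = ((page - 1) // 20) + 1
--         page_in_sipara = ((page - 1) % 20) + 1
--
--         if str(sipara) not in murajaat_pages:
--             murajaat_pages[str(sipara)] = []
--
--         murajaat_pages[str(sipara)].append(page_in_sipara)
--
--     return murajaat_pages
-- ===== SOURCE B (Python) =====
-- def calculate_juzhali_range(last_jadeed_page, juzhali_length=10):
--     """Calculate Juzhali page range from last Jadeed page"""
--     if last_jadeed_page is None:
--         return None, None
--
--     juzhali_end = last_jadeed_page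
--     juzhali_start = max(1, juzhali_end - juzhali_length + 1)
--
--     return juzhali_start, juzhali_end
--
--
-- def get_murajaat_available_pages(last_jadeed_page, juzhali_length=10):
--     """Get pages available for Murajaat review"""
--     if last_jadeed_page is None:
--         return {}
--
--     juzhali_start, _ = calculate_juzhali_range(last_jadeed_page, juzhali_length)
--
--     total = juzhali_start - 1
--     full = total // 20
--     rem = total % 20
--
--     murajaat_pages = {str(s): list(range(1, 21)) for s in range(1, full + 1)}
--     if rem:
--         murajaat_pages[str(full + 1)] = list(range(1, rem + 1))
--
--     return murajaat_pages
-- ===== Notes on version B (the rewrite author's own statement) =====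
-- stated objective: faster
-- what changed: B computes full and partial sipara counts with one divmod and builds each sipara's whole page list directly (dict comprehension over siparas), instead of A's page-by-page loop that buckets every page via // and % and appends one element at a time.
import Mathlib
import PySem

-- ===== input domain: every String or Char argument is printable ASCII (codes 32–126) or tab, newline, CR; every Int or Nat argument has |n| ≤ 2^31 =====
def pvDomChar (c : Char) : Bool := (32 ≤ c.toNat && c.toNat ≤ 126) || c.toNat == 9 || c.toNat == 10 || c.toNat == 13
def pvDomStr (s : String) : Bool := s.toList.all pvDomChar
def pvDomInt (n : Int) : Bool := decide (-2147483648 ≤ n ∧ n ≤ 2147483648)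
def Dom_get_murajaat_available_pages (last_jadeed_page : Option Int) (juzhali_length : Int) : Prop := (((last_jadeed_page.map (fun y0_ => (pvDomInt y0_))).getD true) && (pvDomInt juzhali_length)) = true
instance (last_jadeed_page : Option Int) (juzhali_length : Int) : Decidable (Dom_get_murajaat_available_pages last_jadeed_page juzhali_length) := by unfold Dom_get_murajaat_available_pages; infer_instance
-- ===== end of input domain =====

-- B compact: one divmod gives the number of full siparas and the partial length; B builds each
-- sipara's whole page list at once instead of A's page-by-page bucketing loop (objective: faster,
-- ~20x fewer dict operations).

-- ===== PORT A =====
def calculate_juzhali_range (last_jadeed_page : Option Int) (juzhali_length : Int) : Option Int × Option Int :=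
  match last_jadeed_page with
  | none => (none, none)
  | some l =>
    let juzhali_end := l
    let juzhali_start := max 1 (juzhali_end - juzhali_length + 1)
    (some juzhali_start, some juzhali_end)

def get_murajaat_available_pages (last_jadeed_page : Option Int) (juzhali_length : Int) : List (String × List Int) :=
  match last_jadeed_page with
  | none => []
  | some l =>
    match (calculate_juzhali_range (some l) juzhali_length).1 with
    | none => []   -- unreachable: calculate_juzhali_range on a non-None argument returns ints
    | some juzhali_start =>
      let d := (PySem.List.pyRange 1 juzhali_start 1).foldl
        (fun d page =>
          let sipara := PySem.Int.floordiv (page - 1) 20 + 1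
          let page_in_sipara := PySem.Int.mod (page - 1) 20 + 1
          let d := if d.contains (PySem.Int.toStr sipara) then d else d.insert (PySem.Int.toStr sipara) []
          d.modify (PySem.Int.toStr sipara) [] (fun xs => xs ++ [page_in_sipara]))
        PySem.Dict.empty
      d.items

-- ===== PORT B =====
def get_murajaat_available_pages_alt (last_jadeed_page : Option Int) (juzhali_length : Int) : List (String × List Int) :=
  match last_jadeed_page with
  | none => []
  | some l =>
    match (calculate_juzhali_range (some l) juzhali_length).1 with
    | none => []   -- unreachable
    | some juzhali_start =>
      let total := juzhali_start - 1
      let full := PySem.Int.floordiv total 20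
      let rem := PySem.Int.mod total 20
      let pages := (PySem.List.pyRange 1 (full + 1) 1).foldl
        (fun d s => d.insert (PySem.Int.toStr s) (PySem.List.pyRange 1 21 1))
        PySem.Dict.empty
      let pages := if rem ≠ 0 then pages.insert (PySem.Int.toStr (full + 1)) (PySem.List.pyRange 1 (rem + 1) 1) else pages
      pages.items

-- ===== PRECONDITION & SPEC =====
def Spec_get_murajaat_available_pages (last_jadeed_page : Option Int) (juzhali_length : Int) (out : List (String × List Int)) : Prop := out = get_murajaat_available_pages_alt last_jadeed_page juzhali_length
instance (last_jadeed_page : Option Int) (juzhali_length : Int) (out : List (String × List Int)) : Decidable (Spec_get_murajaat_available_pages last_jadeed_page juzhali_length out) := by unfold Spec_get_murajaat_available_pages; infer_instance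

-- ===== CLAIM (what is proved, stated in full; the proofs are below) =====
def Claim_equal_get_murajaat_available_pages : Prop := ∀ (last_jadeed_page : Option Int) (juzhali_length : Int), Dom_get_murajaat_available_pages last_jadeed_page juzhali_length → Spec_get_murajaat_available_pages last_jadeed_page juzhali_length (get_murajaat_available_pages last_jadeed_page juzhali_length)

-- ===== LEMMAS AND PROOFS =====

-- decimal digits of n, most significant first: a structural form of Nat.toDigits 10
def decRep (n : Nat) : List Char :=
  if n < 10 then [Nat.digitChar n]
  else decRep (n / 10) ++ [Nat.digitChar (n % 10)]
termination_by n
decreasing_by exact Nat.div_lt_self (by omega) (by omega)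

lemma decRep_eq (n : Nat) : decRep n = if n < 10 then [Nat.digitChar n] else decRep (n / 10) ++ [Nat.digitChar (n % 10)] := by
  conv_lhs => rw [decRep]

lemma decRep_ne_nil (n : Nat) : decRep n ≠ [] := by
  rw [decRep_eq]; split_ifs <;> simp

lemma digitChar_inj_lt {a b : Nat} (ha : a < 10) (hb : b < 10) (h : Nat.digitChar a = Nat.digitChar b) : a = b := by
  interval_cases a <;> interval_cases b <;> simp_all [Nat.digitChar]

lemma decRep_inj : ∀ (m n : Nat), decRep m = decRep n → m = n := by
  intro m
  induction m using Nat.strong_induction_on with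
  | _ m ih =>
    intro n h
    rw [decRep_eq m, decRep_eq n] at h
    by_cases hm : m < 10 <;> by_cases hn : n < 10 <;> simp only [hm, hn, if_pos, if_false] at h
    · exact digitChar_inj_lt hm hn (by simpa using h)
    · exfalso
      have := congrArg List.length h; simp at this
      exact decRep_ne_nil _ this
    · exfalso
      have := congrArg List.length h; simp at this
      exact decRep_ne_nil _ this
    · obtain ⟨h1, h2⟩ := List.append_inj' h (by simp)
      have hdiv : m / 10 = n / 10 := ih (m / 10) (Nat.div_lt_self (by omega) (by omega)) _ h1
      have hmod : m % 10 = n % 10 :=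
        digitChar_inj_lt (Nat.mod_lt _ (by omega)) (Nat.mod_lt _ (by omega)) (by simpa using h2)
      omega

lemma toDigitsCore_acc : ∀ (f n : Nat) (acc : List Char),
    Nat.toDigitsCore 10 f n acc = Nat.toDigitsCore 10 f n [] ++ acc := by
  intro f
  induction f with
  | zero => intro n acc; simp [Nat.toDigitsCore]
  | succ f ih =>
    intro n acc
    simp only [Nat.toDigitsCore]
    by_cases h : n / 10 = 0
    · simp [h]
    · simp only [h]
      rw [ih (n / 10) (Nat.digitChar (n % 10) :: acc), ih (n / 10) [Nat.digitChar (n % 10)]]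
      simp

lemma toDigitsCore_eq_decRep : ∀ (f n : Nat), n < f → Nat.toDigitsCore 10 f n [] = decRep n := by
  intro f
  induction f with
  | zero => intro n h; omega
  | succ f ih =>
    intro n h
    simp only [Nat.toDigitsCore]
    by_cases h10 : n < 10
    · have : n / 10 = 0 := Nat.div_eq_of_lt h10
      rw [decRep_eq]
      simp [this, h10, Nat.mod_eq_of_lt h10]
    · have hne : ¬ n / 10 = 0 := by
        intro hc; exact h10 (by omega : n < 10)
      rw [decRep_eq]
      simp only [hne, h10, if_false]
      rw [toDigitsCore_acc, ih (n / 10) (by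
        have := Nat.div_lt_self (by omega : 0 < n) (by omega : 1 < 10)
        omega)]

lemma toStr_inj_pos {a b : Int} (ha : 0 < a) (hb : 0 < b) (h : PySem.Int.toStr a = PySem.Int.toStr b) : a = b := by
  have h' : PySem.Int.toChars a = PySem.Int.toChars b := by
    rw [← PySem.Int.toList_toStr, ← PySem.Int.toList_toStr, h]
  unfold PySem.Int.toChars at h'
  rw [if_neg (by omega), if_neg (by omega)] at h'
  unfold Nat.toDigits at h'
  rw [toDigitsCore_eq_decRep _ _ (Nat.lt_succ_self _),
      toDigitsCore_eq_decRep _ _ (Nat.lt_succ_self _)] at h'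
  have := decRep_inj _ _ h'
  omega

-- the items list both programs build for t completed pages
def specItems (t : Nat) : List (String × List Int) :=
  (List.range (t / 20)).map (fun (k : Nat) => (PySem.Int.toStr ((k : Int) + 1), PySem.List.pyRange 1 21 1))
  ++ (if t % 20 = 0 then []
      else [(PySem.Int.toStr ((t / 20 : Nat) + 1 : Int), PySem.List.pyRange 1 ((t % 20 : Nat) + 1 : Int) 1)])

lemma map_keys_lt {n : Nat} {j : Int} (hj : (n : Int) ≤ j) {p : String × List Int}
    (hp : p ∈ (List.range n).map (fun (k : Nat) => (PySem.Int.toStr ((k : Int) + 1), PySem.List.pyRange 1 21 1))) :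
    p.1 ≠ PySem.Int.toStr (j + 1) := by
  rw [List.mem_map] at hp
  obtain ⟨k, hk, rfl⟩ := hp
  have hkn : k < n := List.mem_range.mp hk
  intro hc
  have := toStr_inj_pos (by omega : (0:Int) < (k : Int) + 1) (by omega : (0:Int) < j + 1) hc
  omega

lemma contains_false (pre : List (String × List Int)) (k : String) (h : ∀ p ∈ pre, p.1 ≠ k) :
    (PySem.Dict.mk pre).contains k = false := by
  rw [PySem.Dict.contains_mk]
  simp only [List.any_eq_false]
  intro p hp
  simpa using h p hp

lemma B_fold (n : Nat) :
    ((PySem.List.pyRange 1 ((n : Int) + 1) 1).foldl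
      (fun d s => d.insert (PySem.Int.toStr s) (PySem.List.pyRange 1 21 1)) PySem.Dict.empty)
    = PySem.Dict.mk ((List.range n).map (fun (k : Nat) => (PySem.Int.toStr ((k : Int) + 1), PySem.List.pyRange 1 21 1))) := by
  apply PySem.Dict.ext
  rw [PySem.Dict.items_foldl_insert_fresh _ _ _ _
    (fun a _ => PySem.Dict.contains_empty _)
    (by
      apply List.Nodup.map_on
      · intro x hx y hy hxy
        rw [PySem.List.mem_pyRange_one] at hx hy
        exact toStr_inj_pos (by omega) (by omega) hxy
      · exact PySem.List.nodup_pyRange_one _ _)]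
  have hr : PySem.List.pyRange 1 ((n:Int)+1) 1 = (List.range n).map (fun (k:Nat) => 1 + (k:Int)) := by
    rw [PySem.List.pyRange_one]
    norm_num
  rw [hr, List.map_map]
  show [] ++ _ = _
  rw [List.nil_append]
  apply List.map_congr_left
  intro k hk
  simp [add_comm]

lemma B_items (t : Nat) :
    (if PySem.Int.mod (t : Int) 20 ≠ 0 then
        ((PySem.List.pyRange 1 (PySem.Int.floordiv (t : Int) 20 + 1) 1).foldl
          (fun d s => d.insert (PySem.Int.toStr s) (PySem.List.pyRange 1 21 1)) PySem.Dict.empty).insert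
          (PySem.Int.toStr (PySem.Int.floordiv (t : Int) 20 + 1))
          (PySem.List.pyRange 1 (PySem.Int.mod (t : Int) 20 + 1) 1)
      else
        (PySem.List.pyRange 1 (PySem.Int.floordiv (t : Int) 20 + 1) 1).foldl
          (fun d s => d.insert (PySem.Int.toStr s) (PySem.List.pyRange 1 21 1)) PySem.Dict.empty).items
    = specItems t := by
  have hfd : PySem.Int.floordiv (t:Int) 20 = ((t/20 : Nat) : Int) := by
    exact_mod_cast PySem.Int.floordiv_natCast t 20
  have hmd : PySem.Int.mod (t:Int) 20 = ((t%20 : Nat) : Int) := by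
    exact_mod_cast PySem.Int.mod_natCast t 20
  rw [hfd, hmd, B_fold (t/20)]
  by_cases h20 : t % 20 = 0
  · rw [if_neg (by simp [h20])]
    simp [specItems, h20]
  · rw [if_pos (by exact_mod_cast h20)]
    rw [PySem.Dict.items_insert_of_not_contains _ _
      (contains_false _ _ (fun p hp => map_keys_lt (le_refl _) hp))]
    simp only [specItems, if_neg h20]

lemma get?_append_last (pre : List (String × List Int)) (k : String) (v : List Int)
    (h : ∀ p ∈ pre, p.1 ≠ k) :
    (PySem.Dict.mk (pre ++ [(k, v)])).get? k = some v := by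
  induction pre with
  | nil => simp [PySem.Dict.get?_mk_cons]
  | cons q pre ih =>
    obtain ⟨qk, qv⟩ := q
    rw [List.cons_append, PySem.Dict.get?_mk_cons]
    have hq : qk ≠ k := h (qk, qv) (by simp)
    simp only [beq_iff_eq, if_neg hq]
    exact ih (fun p hp => h p (by simp [hp]))

lemma map_replace (pre : List (String × List Int)) (k : String) (v w : List Int)
    (h : ∀ p ∈ pre, p.1 ≠ k) :
    (pre ++ [(k, v)]).map (fun p => if p.1 == k then (k, w) else p) = pre ++ [(k, w)] := by
  induction pre with
  | nil => simp
  | cons q pre ih =>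
    obtain ⟨qk, qv⟩ := q
    have hq : (qk == k) = false := beq_eq_false_iff_ne.mpr (h (qk, qv) (by simp))
    simp only [List.cons_append, List.map_cons, hq, Bool.false_eq_true, if_false]
    rw [ih (fun p hp => h p (by simp [hp]))]

lemma step_new (pre : List (String × List Int)) (k : String) (x : Int)
    (h : ∀ p ∈ pre, p.1 ≠ k) :
    ((if (PySem.Dict.mk pre).contains k then (PySem.Dict.mk pre) else (PySem.Dict.mk pre).insert k []).modify k [] (fun xs => xs ++ [x]))
      = PySem.Dict.mk (pre ++ [(k, [x])]) := by
  have hc := contains_false pre k h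
  rw [hc]
  simp only [Bool.false_eq_true, if_false]
  have h1 : (PySem.Dict.mk pre).insert k [] = PySem.Dict.mk (pre ++ [(k, ([] : List Int))]) := by
    apply PySem.Dict.ext
    rw [PySem.Dict.items_insert_of_not_contains _ _ hc]
  rw [h1]
  simp only [PySem.Dict.modify]
  have hg : (PySem.Dict.mk (pre ++ [(k, ([] : List Int))])).getD k [] = [] := by
    rw [PySem.Dict.getD_eq_get?_getD, get?_append_last pre k _ h]
    rfl
  rw [hg]
  have hct : (PySem.Dict.mk (pre ++ [(k, ([] : List Int))])).contains k = true := by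
    rw [PySem.Dict.contains_mk]; simp
  apply PySem.Dict.ext
  rw [PySem.Dict.items_insert_of_contains _ _ hct]
  simpa using map_replace pre k [] [x] h

lemma step_app (pre : List (String × List Int)) (k : String) (v : List Int) (x : Int)
    (h : ∀ p ∈ pre, p.1 ≠ k) :
    ((if (PySem.Dict.mk (pre ++ [(k, v)])).contains k then (PySem.Dict.mk (pre ++ [(k, v)])) else (PySem.Dict.mk (pre ++ [(k, v)])).insert k []).modify k [] (fun xs => xs ++ [x]))
      = PySem.Dict.mk (pre ++ [(k, v ++ [x])]) := by
  have hct : (PySem.Dict.mk (pre ++ [(k, v)])).contains k = true := by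
    rw [PySem.Dict.contains_mk]; simp
  rw [hct]
  simp only [if_true]
  simp only [PySem.Dict.modify]
  have hg : (PySem.Dict.mk (pre ++ [(k, v)])).getD k [] = v := by
    rw [PySem.Dict.getD_eq_get?_getD, get?_append_last pre k _ h]
    rfl
  rw [hg]
  apply PySem.Dict.ext
  rw [PySem.Dict.items_insert_of_contains _ _ hct]
  exact map_replace pre k v (v ++ [x]) h

lemma A_items : ∀ t : Nat,
    ((PySem.List.pyRange 1 ((t : Int) + 1) 1).foldl
      (fun d page =>
        (if d.contains (PySem.Int.toStr (PySem.Int.floordiv (page - 1) 20 + 1)) = true then d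
            else d.insert (PySem.Int.toStr (PySem.Int.floordiv (page - 1) 20 + 1)) []).modify
          (PySem.Int.toStr (PySem.Int.floordiv (page - 1) 20 + 1)) [] (fun xs =>
          xs ++ [PySem.Int.mod (page - 1) 20 + 1]))
      PySem.Dict.empty).items = specItems t := by
  intro t
  induction t with
  | zero =>
    rw [PySem.List.pyRange_one_eq_nil (by norm_num)]
    simp [specItems, PySem.Dict.empty]
  | succ t ih =>
    have hsplit : PySem.List.pyRange 1 (((t+1 : Nat) : Int) + 1) 1
        = PySem.List.pyRange 1 ((t : Int) + 1) 1 ++ [(t : Int) + 1] := by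
      have h1 : (((t+1 : Nat) : Int) + 1) = ((t : Int) + 1) + 1 := by push_cast; ring
      rw [h1, PySem.List.pyRange_one_succ_right (by omega)]
    rw [hsplit, List.foldl_append]
    have hd : ((PySem.List.pyRange 1 ((t : Int) + 1) 1).foldl
        (fun d page =>
          (if d.contains (PySem.Int.toStr (PySem.Int.floordiv (page - 1) 20 + 1)) = true then d
              else d.insert (PySem.Int.toStr (PySem.Int.floordiv (page - 1) 20 + 1)) []).modify
            (PySem.Int.toStr (PySem.Int.floordiv (page - 1) 20 + 1)) [] (fun xs =>
            xs ++ [PySem.Int.mod (page - 1) 20 + 1]))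
        PySem.Dict.empty) = PySem.Dict.mk (specItems t) := PySem.Dict.ext ih
    rw [hd]
    simp only [List.foldl_cons, List.foldl_nil, add_sub_cancel_right]
    have hfd : PySem.Int.floordiv (t:Int) 20 = ((t/20 : Nat) : Int) := by
      exact_mod_cast PySem.Int.floordiv_natCast t 20
    have hmd : PySem.Int.mod (t:Int) 20 = ((t%20 : Nat) : Int) := by
      exact_mod_cast PySem.Int.mod_natCast t 20
    rw [hfd, hmd]
    by_cases h20 : t % 20 = 0
    · have hpre : specItems t = (List.range (t / 20)).map
          (fun (k : Nat) => (PySem.Int.toStr ((k : Int) + 1), PySem.List.pyRange 1 21 1)) := by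
        simp [specItems, h20]
      rw [hpre, step_new _ _ _ (fun p hp => map_keys_lt (le_refl _) hp)]
      -- now show mk (pre ++ [(key, [↑(t%20)+1])]) .items = specItems (t+1)
      show _ ++ _ = specItems (t + 1)
      have hdiv : (t+1) / 20 = t / 20 := by omega
      have hmod : (t+1) % 20 = 1 := by omega
      simp only [specItems, hdiv, hmod, h20]
      have h2 : PySem.List.pyRange 1 2 1 = [1] := by decide
      norm_num [h2]
    · have hpre : specItems t = ((List.range (t / 20)).map
          (fun (k : Nat) => (PySem.Int.toStr ((k : Int) + 1), PySem.List.pyRange 1 21 1)))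
          ++ [(PySem.Int.toStr ((t / 20 : Nat) + 1 : Int), PySem.List.pyRange 1 ((t % 20 : Nat) + 1 : Int) 1)] := by
        simp [specItems, h20]
      rw [hpre, step_app _ _ _ _ (fun p hp => map_keys_lt (le_refl _) hp)]
      show _ ++ _ = specItems (t + 1)
      have happ : PySem.List.pyRange 1 ((t % 20 : Nat) + 1 : Int) 1 ++ [((t % 20 : Nat) : Int) + 1]
          = PySem.List.pyRange 1 (((t % 20 : Nat) : Int) + 1 + 1) 1 :=
        (PySem.List.pyRange_one_succ_right (b := ((t % 20 : Nat) : Int) + 1) (by omega)).symm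
      rw [happ]
      by_cases h19 : t % 20 = 19
      · have hdiv : (t+1) / 20 = t / 20 + 1 := by omega
        have hmod : (t+1) % 20 = 0 := by omega
        have h21 : ((t % 20 : Nat) : Int) + 1 + 1 = 21 := by omega
        rw [h21]
        simp [specItems, hdiv, hmod, List.range_succ]
      · have hdiv : (t+1) / 20 = t / 20 := by omega
        have hmod : (t+1) % 20 = t % 20 + 1 := by omega
        simp only [specItems, hdiv, hmod]
        rw [if_neg (by omega)]
        push_cast
        ring_nf

-- ===== VERDICT (by name: the statement is the Claim_ definition above) =====
theorem get_murajaat_available_pages_spec : Claim_equal_get_murajaat_available_pages := by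
  intro last jl _
  unfold Spec_get_murajaat_available_pages
  cases last with
  | none => rfl
  | some l =>
    unfold get_murajaat_available_pages get_murajaat_available_pages_alt calculate_juzhali_range
    simp only
    set s : Int := max 1 (l - jl + 1) with hs
    have hs1 : 1 ≤ s := le_max_left _ _
    set t : Nat := (s - 1).toNat with ht
    have hts : (t : Int) + 1 = s := by omega
    rw [← hts]
    simp only [add_sub_cancel_right]
    rw [A_items t, B_items t]
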